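-- pv_equiv track=rewrite | github.com/teravaidya/GeekforGeeks-Python | LateRide.py | solution
-- ===== SOURCE A (Python) =====
-- import math
--
-- def solution(n):
--   sum = 0
--   if n < 10:
--     return n
--   hours = math.floor(n / 60)
--   mins = n - hours * 60
--
--   for digit in str(hours):
--     sum += int(digit)
--
--   for digit in str(mins):
--     sum += int(digit)
--   return sum
-- ===== SOURCE B (Python) =====
-- import math
--
-- def _digit_sum(x):
--     s = 0
--     while x > 0:
--         s += x % 10
--         x //= 10
--     return s
--
-- def solution(n):
--     if n < 10:
--         return n
--     hours = n // 60
--     mins = n - hours * 60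
--     return _digit_sum(hours) + _digit_sum(mins)
-- ===== Notes on version B (the rewrite author's own statement) =====
-- stated objective: idiomatic
-- what changed: Replaces the two str()-building loops that parse each character back with int() by pure arithmetic digit extraction (x % 10 accumulation with x //= 10), never constructing a string.
import Mathlib
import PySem

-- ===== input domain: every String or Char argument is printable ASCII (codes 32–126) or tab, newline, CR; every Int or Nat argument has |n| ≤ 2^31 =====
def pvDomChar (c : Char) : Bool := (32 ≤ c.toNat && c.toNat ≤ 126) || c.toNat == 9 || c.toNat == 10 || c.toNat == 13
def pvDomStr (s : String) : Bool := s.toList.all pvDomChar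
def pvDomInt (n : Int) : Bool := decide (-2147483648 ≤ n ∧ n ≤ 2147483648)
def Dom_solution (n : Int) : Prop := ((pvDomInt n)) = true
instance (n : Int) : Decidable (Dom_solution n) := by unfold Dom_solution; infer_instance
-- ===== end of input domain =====

-- B replaces A's str()-building digit loops with arithmetic digit extraction (x % 10 / x //= 10); idiomatic, same cost.


-- ===== PORT A =====
-- math.floor(n / 60) is ported as floor division: exact for |n| ≤ 2^31 (the float n/60 is
-- within 2^-20 of the rational value, which is at least 1/60 from any other integer, so the
-- float floor equals the integer floor on all of Dom).
def solution (n : Int) : Int :=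
  let sum : Int := 0
  if n < 10 then n
  else
    let hours : Int := PySem.Int.floordiv n 60
    let mins : Int := n - hours * 60
    -- for digit in str(hours): sum += int(digit)   (int(digit) never fails: each char is a decimal digit)
    let sum := (PySem.Int.toStr hours).toList.foldl
      (fun s c => s + (PySem.Int.ofChars? [c]).getD 0) sum
    let sum := (PySem.Int.toStr mins).toList.foldl
      (fun s c => s + (PySem.Int.ofChars? [c]).getD 0) sum
    sum

-- ===== PORT B =====
-- while x > 0: s += x % 10; x //= 10
def digsumAlt (x : Int) : Int :=
  if _h : 0 < x then PySem.Int.mod x 10 + digsumAlt (PySem.Int.floordiv x 10) else 0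
termination_by x.toNat
decreasing_by
  simp only [PySem.Int.floordiv, Int.fdiv_eq_ediv_of_nonneg _ (by norm_num : (0:Int) ≤ 10)]
  omega

def solution_alt (n : Int) : Int :=
  if n < 10 then n
  else
    let hours : Int := PySem.Int.floordiv n 60
    let mins : Int := n - hours * 60
    digsumAlt hours + digsumAlt mins

-- ===== PRECONDITION & SPEC =====
def Spec_solution (n : Int) (out : Int) : Prop := out = solution_alt n
instance (n : Int) (out : Int) : Decidable (Spec_solution n out) := by unfold Spec_solution; infer_instance

-- ===== CLAIM (what is proved, stated in full; the proofs are below) =====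
def Claim_equal_solution : Prop := ∀ (n : Int), Dom_solution n → Spec_solution n (solution n)

-- ===== LEMMAS AND PROOFS =====

-- value of one digit character under A's int(digit)
def pvVal (c : Char) : Int := (PySem.Int.ofChars? [c]).getD 0

def pvSumVals (cs : List Char) : Int := (cs.map pvVal).sum

-- arithmetic digit sum on Nat, the reference both sides are reduced to
def pvDsumN (m : Nat) : Int :=
  if m = 0 then 0 else ((m % 10 : Nat) : Int) + pvDsumN (m / 10)
decreasing_by exact Nat.div_lt_self (by omega) (by norm_num)

lemma pvDsumN_eq (m : Nat) : pvDsumN m = ((m % 10 : Nat) : Int) + pvDsumN (m / 10) := by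
  rw [pvDsumN]
  rcases Nat.eq_zero_or_pos m with h | h
  · subst h; simp [pvDsumN]
  · simp [Nat.pos_iff_ne_zero.mp h]

lemma pvVal_digitChar (d : Nat) (hd : d < 10) : pvVal d.digitChar = (d : Int) := by
  interval_cases d <;> decide

lemma pvSumVals_toDigitsCore (fuel : Nat) :
    ∀ (n : Nat) (ds : List Char), n < fuel →
      pvSumVals (Nat.toDigitsCore 10 fuel n ds)
        = ((n % 10 : Nat) : Int) + pvDsumN (n / 10) + pvSumVals ds := by
  induction fuel with
  | zero => intro n ds h; omega
  | succ fuel ih =>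
    intro n ds h
    rw [Nat.toDigitsCore]
    by_cases h0 : n / 10 = 0
    · have hz : pvDsumN 0 = 0 := by rw [pvDsumN]; simp
      simp only [h0, if_pos, pvSumVals, List.map_cons, List.sum_cons,
        pvVal_digitChar (n % 10) (Nat.mod_lt _ (by norm_num)), hz]
      ring
    · have hlt : n / 10 < fuel := by
        have : n / 10 < n := Nat.div_lt_self (by omega) (by norm_num)
        omega
      simp only [if_neg h0]
      rw [ih (n / 10) _ hlt]
      rw [pvDsumN_eq (n / 10)]
      simp only [pvSumVals, List.map_cons, List.sum_cons,
        pvVal_digitChar (n % 10) (Nat.mod_lt _ (by norm_num))]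
      ring

lemma digsumAlt_natCast (m : Nat) : digsumAlt (m : Int) = pvDsumN m := by
  induction m using Nat.strong_induction_on with
  | _ m ih =>
    rw [digsumAlt.eq_def, pvDsumN]
    rcases Nat.eq_zero_or_pos m with h | h
    · subst h; simp
    · have hm : (0 : Int) < (m : Int) := by exact_mod_cast h
      have hdvd : PySem.Int.floordiv (m : Int) 10 = ((m / 10 : Nat) : Int) := by
        simp only [PySem.Int.floordiv, Int.fdiv_eq_ediv_of_nonneg _ (by norm_num : (0:Int) ≤ 10)]
        omega
      have hmod : PySem.Int.mod (m : Int) 10 = ((m % 10 : Nat) : Int) := by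
        simp only [PySem.Int.mod]
        rw [Int.fmod_eq_emod]
        simp
      rw [dif_pos hm, if_neg (Nat.pos_iff_ne_zero.mp h), hdvd, hmod,
        ih (m / 10) (Nat.div_lt_self h (by norm_num))]

lemma pvSumVals_toChars (a : Int) (ha : 0 ≤ a) :
    pvSumVals (PySem.Int.toChars a) = digsumAlt a := by
  obtain ⟨m, rfl⟩ := Int.eq_ofNat_of_zero_le ha
  simp only [PySem.Int.toChars, Nat.toDigits]
  rw [if_neg (by omega), Int.toNat_natCast,
    pvSumVals_toDigitsCore (m + 1) m [] (by omega), digsumAlt_natCast, pvDsumN_eq m]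
  simp [pvSumVals]

lemma pvFoldl_val (cs : List Char) (a : Int) :
    cs.foldl (fun s c => s + (PySem.Int.ofChars? [c]).getD 0) a = a + pvSumVals cs := by
  simpa [pvVal, pvSumVals] using PySem.List.foldl_add cs (fun c => (PySem.Int.ofChars? [c]).getD 0) a

-- ===== VERDICT (by name: the statement is the Claim_ definition above) =====
theorem solution_spec : Claim_equal_solution := by
  intro n _
  unfold Spec_solution solution solution_alt
  by_cases hn : n < 10
  · simp [hn]
  · have hn' : (10 : Int) ≤ n := by omega
    simp only [if_neg hn]
    have hhours : 0 ≤ PySem.Int.floordiv n 60 := by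
      simp only [PySem.Int.floordiv, Int.fdiv_eq_ediv_of_nonneg _ (by norm_num : (0:Int) ≤ 60)]
      omega
    have hmins : 0 ≤ n - PySem.Int.floordiv n 60 * 60 := by
      simp only [PySem.Int.floordiv, Int.fdiv_eq_ediv_of_nonneg _ (by norm_num : (0:Int) ≤ 60)]
      omega
    simp only [PySem.Int.toList_toStr, pvFoldl_val,
      pvSumVals_toChars _ hhours, pvSumVals_toChars _ hmins]
    ring
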